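-- pv_equiv track=rewrite | github.com/Mao-beta/AtCoder | ARC/ARC173/ARC173C.py | guchoku
-- ===== SOURCE A (Python) =====
-- def guchoku(N, P):
--     ans = [N+1] * N
--     for i in range(N):
--         for l in range(i+1):
--             for r in range(i+1, N+1):
--                 g = r-l
--                 if g % 2 == 0:
--                     continue
--                 p = P[l:r]
--                 p.sort()
--                 if p[g//2] != P[i]:
--                     ans[i] = min(ans[i], g)
--         if ans[i] == N+1:
--             ans[i] = -1
--     return ans
-- ===== SOURCE B (Python) =====
-- def guchoku(N, P):
--     # Prefix counts of elements < x and <= x make each window's median test O(1): no slicing, no sorting.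
--     ans = []
--     for i in range(N):
--         x = P[i]
--         lt = [0]
--         le = [0]
--         for v in P[:N]:
--             lt.append(lt[-1] + (1 if v < x else 0))
--             le.append(le[-1] + (1 if v <= x else 0))
--         best = N + 1
--         for l in range(i + 1):
--             for r in range(i + 1, N + 1):
--                 g = r - l
--                 if g % 2 == 0:
--                     continue
--                 m = g // 2
--                 if lt[r] - lt[l] >= m + 1 or le[r] - le[l] <= m:
--                     best = min(best, g)
--         ans.append(best if best != N + 1 else -1)
--     return ans
-- ===== Notes on version B (the rewrite author's own statement) =====
-- stated objective: faster
-- what changed: B precomputes per-index prefix counts of elements smaller / not-larger than P[i] and tests each window's median by two O(1) count comparisons, instead of slicing and sorting every window; intended as faster (a timing run measured B ~1.7-5x ahead at the largest size both finished, unconfirmed beyond since both time out).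
import Mathlib
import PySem

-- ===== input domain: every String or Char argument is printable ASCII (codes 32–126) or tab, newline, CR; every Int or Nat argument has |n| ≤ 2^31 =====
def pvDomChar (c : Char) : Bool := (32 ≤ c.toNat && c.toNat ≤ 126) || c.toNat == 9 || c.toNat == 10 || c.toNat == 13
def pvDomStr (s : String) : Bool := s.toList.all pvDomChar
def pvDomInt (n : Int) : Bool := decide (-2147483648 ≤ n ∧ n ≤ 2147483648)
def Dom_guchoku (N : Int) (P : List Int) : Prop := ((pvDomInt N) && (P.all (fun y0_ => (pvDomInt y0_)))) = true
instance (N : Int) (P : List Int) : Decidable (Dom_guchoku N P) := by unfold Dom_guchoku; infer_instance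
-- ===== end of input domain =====

-- B replaces A's per-window slice+sort median test by O(1) prefix-count comparisons; intended as faster (a timing run measured B ~1.7-5x ahead at the largest size both Pythons finished; unconfirmed beyond, where both time out).


-- ===== PORT A =====
-- body of A's loop over i (computes ans[i])
def aBody (N : Int) (P : List Int) (i : Int) : Int :=
  let ai :=
    (PySem.List.pyRange 0 (i + 1) 1).foldl (fun ai l =>
      (PySem.List.pyRange (i + 1) (N + 1) 1).foldl (fun ai r =>
        let g := r - l
        if PySem.Int.mod g 2 = 0 then ai
        else
          let p := PySem.List.sorted (PySem.List.slice P (some l) (some r)) (fun y => y) false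
          if PySem.List.pyGetD p (PySem.Int.floordiv g 2) 0 ≠ PySem.List.pyGetD P i 0 then
            min ai g
          else ai) ai) (N + 1)
  if ai = N + 1 then -1 else ai

def guchoku (N : Int) (P : List Int) : List Int :=
  (PySem.List.pyRange 0 N 1).map (aBody N P)

-- ===== PORT B =====
-- body of B's loop over i (the value appended to ans)
def bBody (N : Int) (P : List Int) (i : Int) : Int :=
  let x := PySem.List.pyGetD P i 0
  let arrs :=
    (PySem.List.slice P none (some N)).foldl
      (fun a v =>
        (a.1 ++ [PySem.List.pyGetD a.1 (-1) 0 + if v < x then 1 else 0],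
         a.2 ++ [PySem.List.pyGetD a.2 (-1) 0 + if v ≤ x then 1 else 0]))
      ([0], [0])
  let lt := arrs.1
  let le := arrs.2
  let best :=
    (PySem.List.pyRange 0 (i + 1) 1).foldl (fun b l =>
      (PySem.List.pyRange (i + 1) (N + 1) 1).foldl (fun b r =>
        let g := r - l
        if PySem.Int.mod g 2 = 0 then b
        else
          let m := PySem.Int.floordiv g 2
          if m + 1 ≤ PySem.List.pyGetD lt r 0 - PySem.List.pyGetD lt l 0 ∨
              PySem.List.pyGetD le r 0 - PySem.List.pyGetD le l 0 ≤ m then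
            min b g
          else b) b) (N + 1)
  if best ≠ N + 1 then best else -1

def guchoku_alt (N : Int) (P : List Int) : List Int :=
  (PySem.List.pyRange 0 N 1).foldl (fun ans i => ans ++ [bBody N P i]) []

-- ===== PRECONDITION & SPEC =====
-- Pre_ excludes N > len(P), on which A raises IndexError (P[i] / p[g//2]); it admits every input A returns on.
def Pre_guchoku (N : Int) (P : List Int) : Prop := N ≤ (P.length : Int)
instance (N : Int) (P : List Int) : Decidable (Pre_guchoku N P) := by unfold Pre_guchoku; infer_instance
def pvWitness_guchoku : Int × List Int := (3, [2, 1, 3])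
def Spec_guchoku (N : Int) (P : List Int) (out : List Int) : Prop := out = guchoku_alt N P
instance (N : Int) (P : List Int) (out : List Int) : Decidable (Spec_guchoku N P out) := by unfold Spec_guchoku; infer_instance

-- ===== CLAIM (what is proved, stated in full; the proofs are below) =====
def Claim_equal_guchoku : Prop := ∀ (N : Int) (P : List Int), Dom_guchoku N P → Pre_guchoku N P → Spec_guchoku N P (guchoku N P)

-- ===== LEMMAS AND PROOFS =====

-- In a sorted list, a downward-closed predicate holds at index m iff at least m+1 elements satisfy it.
theorem sorted_pred_getElem_iff (q : List Int) (hs : q.Pairwise (· ≤ ·)) (p : Int → Bool)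
    (hp : ∀ a b : Int, a ≤ b → p b = true → p a = true) (m : Nat) (hm : m < q.length) :
    (p q[m] = true ↔ m + 1 ≤ q.countP p) := by
  have hpw := List.pairwise_iff_getElem.mp hs
  constructor
  · intro h
    have hall : ∀ y ∈ q.take (m+1), p y = true := by
      intro y hy
      obtain ⟨j, hj, rfl⟩ := List.mem_take_iff_getElem.mp hy
      rcases Nat.lt_or_ge j m with hlt | hge
      · exact hp _ _ (hpw j m (by omega) hm hlt) h
      · have hjm : j = m := by omega
        subst hjm; exact h
    have h1 : (q.take (m+1)).countP p = (q.take (m+1)).length := List.countP_eq_length.mpr hall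
    have h2 : (q.take (m+1)).length = m+1 := by simp [List.length_take]; omega
    have h3 : q.countP p = (q.take (m+1)).countP p + (q.drop (m+1)).countP p := by
      conv_lhs => rw [← List.take_append_drop (m+1) q]
      rw [List.countP_append]
    omega
  · intro h
    by_contra hcon
    have hpm : p q[m] = false := by
      cases hpq : p q[m] with
      | true => exact absurd hpq hcon
      | false => rfl
    have hdrop : ∀ y ∈ q.drop m, ¬ (p y = true) := by
      intro y hy hpy
      obtain ⟨j, hj, rfl⟩ := List.mem_iff_getElem.mp hy
      rw [List.getElem_drop] at hpy
      have : p q[m] = true := hp _ _ (by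
        rcases Nat.eq_or_lt_of_le (Nat.le_add_right m j) with he | hlt
        · have hj0 : j = 0 := by omega
          subst hj0; simp
        · exact hpw m (m+j) hm (by simp at hj; omega) hlt) hpy
      rw [hpm] at this; exact Bool.false_ne_true this
    have h0 : (q.drop m).countP p = 0 := List.countP_eq_zero.mpr hdrop
    have h3 : q.countP p = (q.take m).countP p + (q.drop m).countP p := by
      conv_lhs => rw [← List.take_append_drop m q]
      rw [List.countP_append]
    have h4 : (q.take m).countP p ≤ (q.take m).length := List.countP_le_length
    have h5 : (q.take m).length ≤ m := by simp [List.length_take]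
    omega

-- The Python median test "sorted(w)[m] != x" in terms of counts of smaller / not-larger elements.

-- The Python median test "sorted(w)[m] != x" in terms of counts of smaller / not-larger elements.
theorem median_ne_iff (w : List Int) (x : Int) (m : Nat) (hm : m < w.length) :
    (PySem.List.pyGetD (PySem.List.sorted w (fun y => y) false) (m : Int) 0 ≠ x ↔
      (m + 1 ≤ w.countP (fun y => decide (y < x)) ∨ w.countP (fun y => decide (y ≤ x)) ≤ m)) := by
  set q := PySem.List.sorted w (fun y => y) false with hq
  have hperm : q.Perm w := PySem.List.sorted_perm w (fun y => y) false
  have hlen : q.length = w.length := hperm.length_eq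
  have hmq : m < q.length := by omega
  have hs : q.Pairwise (· ≤ ·) := by
    have := PySem.List.sorted_pairwise (xs := w) (key := fun y => y)
    simpa using this
  have hget : PySem.List.pyGetD q (m : Int) 0 = q[m] := by
    rw [PySem.List.pyGetD_natCast]
    exact List.getD_eq_getElem q 0 hmq
  rw [hget]
  have hlt : (q[m] < x ↔ m + 1 ≤ w.countP (fun y => decide (y < x))) := by
    rw [← hperm.countP_eq]
    have := sorted_pred_getElem_iff q hs (fun y => decide (y < x))
      (fun a b hab hb => by simp at hb ⊢; omega) m hmq
    simpa using this
  have hle : (q[m] ≤ x ↔ m + 1 ≤ w.countP (fun y => decide (y ≤ x))) := by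
    rw [← hperm.countP_eq]
    have := sorted_pred_getElem_iff q hs (fun y => decide (y ≤ x))
      (fun a b hab hb => by simp at hb ⊢; omega) m hmq
    simpa using this
  constructor
  · intro hne
    rcases lt_or_gt_of_ne hne with h | h
    · exact Or.inl (hlt.mp h)
    · exact Or.inr (by by_contra hc; exact absurd (hle.mpr (by omega)) (by omega))
  · intro h hx
    subst hx
    rcases h with h | h
    · exact absurd (hlt.mpr h) (lt_irrefl _)
    · exact absurd (hle.mp (le_refl _)) (by omega)

-- The fold building a prefix-count list, characterised.
theorem prefix_counts_aux (Q : Int → Prop) [DecidablePred Q] (xs : List Int) (acc : List Int) (c : Int)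
    (h : PySem.List.pyGetD acc (-1) 0 = c) :
    xs.foldl (fun a v => a ++ [PySem.List.pyGetD a (-1) 0 + if Q v then 1 else 0]) acc
      = acc ++ (List.range xs.length).map
          (fun j => c + ((xs.take (j+1)).countP (fun y => decide (Q y)) : Int)) := by
  induction xs generalizing acc c with
  | nil => simp
  | cons v xs ih =>
    simp only [List.foldl_cons, h]
    rw [ih (acc ++ [c + if Q v then 1 else 0]) (c + if Q v then 1 else 0)
      (PySem.List.pyGetD_neg_one_append_singleton acc _ _)]
    rw [List.length_cons, List.range_succ_eq_map, List.map_cons, List.map_map, List.append_assoc,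
      List.singleton_append]
    congr 2
    · by_cases hv : Q v <;> simp [hv]
    · refine List.map_congr_left ?_
      intro j _
      simp only [Function.comp_apply, List.take_succ_cons, List.countP_cons]
      by_cases hv : Q v
      · simp [hv]; omega
      · simp [hv]

-- Looking up the prefix-count list at an in-range index t gives the count over the length-t prefix.
theorem prefix_lookup (Q : Int → Prop) [DecidablePred Q] (xs : List Int) (t : Int)
    (h0 : 0 ≤ t) (h1 : t ≤ (xs.length : Int)) :
    PySem.List.pyGetD
      (xs.foldl (fun a v => a ++ [PySem.List.pyGetD a (-1) 0 + if Q v then 1 else 0]) [0]) t 0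
      = ((xs.take t.toNat).countP (fun y => decide (Q y)) : Int) := by
  rw [prefix_counts_aux Q xs [0] 0 (by decide)]
  have hL : ([(0:Int)] ++ (List.range xs.length).map
      (fun j => 0 + ((xs.take (j+1)).countP (fun y => decide (Q y)) : Int)))
      = (List.range (xs.length+1)).map
          (fun j => ((xs.take j).countP (fun y => decide (Q y)) : Int)) := by
    rw [List.range_succ_eq_map, List.map_cons, List.map_map]
    simp [Function.comp]
  rw [hL]
  rw [PySem.List.pyGetD_eq_getElem _ _ h0 (by simp; omega)]
  rw [List.getElem_map, List.getElem_range]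

-- A window's count is the difference of two prefix counts.
theorem count_window (p : Int → Bool) (P : List Int) (l r : Nat) (hlr : l ≤ r) :
    (P.take r).countP p = (P.take l).countP p + (((P.drop l).take (r - l)).countP p) := by
  have : P.take r = P.take l ++ (P.drop l).take (r - l) := by
    rw [← List.take_add, Nat.add_sub_cancel' hlr]
  rw [this, List.countP_append]

-- The A-side sorted-median test equals the B-side prefix-count test for every window.
theorem cond_iff (P : List Int) (x l r N : Int) (h0 : 0 ≤ l) (hlr : l < r)
    (hNr : r ≤ N) (hNP : N ≤ (P.length : Int)) :
    ((PySem.List.pyGetD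
        (PySem.List.sorted (PySem.List.slice P (some l) (some r)) (fun y => y) false)
        (PySem.Int.floordiv (r - l) 2) 0 ≠ x)
      ↔ (PySem.Int.floordiv (r - l) 2 + 1 ≤
            PySem.List.pyGetD ((PySem.List.slice P none (some N)).foldl
              (fun a v => a ++ [PySem.List.pyGetD a (-1) 0 + if v < x then 1 else 0]) [0]) r 0
            - PySem.List.pyGetD ((PySem.List.slice P none (some N)).foldl
              (fun a v => a ++ [PySem.List.pyGetD a (-1) 0 + if v < x then 1 else 0]) [0]) l 0
          ∨ PySem.List.pyGetD ((PySem.List.slice P none (some N)).foldl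
              (fun a v => a ++ [PySem.List.pyGetD a (-1) 0 + if v ≤ x then 1 else 0]) [0]) r 0
            - PySem.List.pyGetD ((PySem.List.slice P none (some N)).foldl
              (fun a v => a ++ [PySem.List.pyGetD a (-1) 0 + if v ≤ x then 1 else 0]) [0]) l 0
            ≤ PySem.Int.floordiv (r - l) 2)) := by
  have h0r : (0:Int) ≤ r := by omega
  have h0N : (0:Int) ≤ N := by omega
  -- the slice iterated over by B is P.take N
  have hxs : PySem.List.slice P none (some N) = P.take N.toNat := PySem.List.slice_to P h0N
  have hxslen : (P.take N.toNat).length = N.toNat := by simp; omega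
  -- lookups in the prefix-count lists
  have hlen1 : (l : Int) ≤ ((P.take N.toNat).length : Int) := by rw [hxslen]; omega
  have hlen2 : (r : Int) ≤ ((P.take N.toNat).length : Int) := by rw [hxslen]; omega
  rw [hxs, prefix_lookup (fun v => v < x) _ r h0r hlen2, prefix_lookup (fun v => v < x) _ l h0 hlen1,
    prefix_lookup (fun v => v ≤ x) _ r h0r hlen2, prefix_lookup (fun v => v ≤ x) _ l h0 hlen1]
  -- takes of the truncated list are takes of P
  have htt1 : (P.take N.toNat).take r.toNat = P.take r.toNat := by
    rw [List.take_take]; congr 1; omega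
  have htt2 : (P.take N.toNat).take l.toNat = P.take l.toNat := by
    rw [List.take_take]; congr 1; omega
  rw [htt1, htt2]
  -- the window
  have hw : PySem.List.slice P (some l) (some r) = (P.drop l.toNat).take (r.toNat - l.toNat) :=
    PySem.List.slice_toNat P h0 h0r
  have hwlen : ((P.drop l.toNat).take (r.toNat - l.toNat)).length = (r - l).toNat := by
    simp; omega
  -- the median index
  have hm : PySem.Int.floordiv (r - l) 2 = (((r - l).toNat / 2 : Nat) : Int) := by
    rw [PySem.Int.floordiv_eq_ediv_of_pos (by omega)]; omega
  have hmlt : (r - l).toNat / 2 < ((P.drop l.toNat).take (r.toNat - l.toNat)).length := by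
    rw [hwlen]; omega
  rw [hw, hm, median_ne_iff _ x _ hmlt]
  -- count differences are window counts
  have hc1 := count_window (fun y => decide (y < x)) P l.toNat r.toNat (by omega)
  have hc2 := count_window (fun y => decide (y ≤ x)) P l.toNat r.toNat (by omega)
  constructor
  · rintro (h | h)
    · left; omega
    · right; omega
  · rintro (h | h)
    · left; omega
    · right; omega

-- The two loop bodies agree for every index of the answer list.
theorem body_eq (N : Int) (P : List Int) (i : Int) (hN : N ≤ (P.length : Int))
    (_hi : 0 ≤ i) (_hiN : i < N) : aBody N P i = bBody N P i := by
  simp only [aBody, bBody]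
  rw [PySem.List.foldl_prod_mk
    (f := fun a1 v => a1 ++ [PySem.List.pyGetD a1 (-1) 0 + if v < PySem.List.pyGetD P i 0 then 1 else 0])
    (g := fun a2 v => a2 ++ [PySem.List.pyGetD a2 (-1) 0 + if v ≤ PySem.List.pyGetD P i 0 then 1 else 0])]
  have hfold :
      (PySem.List.pyRange 0 (i + 1) 1).foldl (fun ai l =>
        (PySem.List.pyRange (i + 1) (N + 1) 1).foldl (fun ai r =>
          if PySem.Int.mod (r - l) 2 = 0 then ai
          else
            if PySem.List.pyGetD
                (PySem.List.sorted (PySem.List.slice P (some l) (some r)) (fun y => y) false)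
                (PySem.Int.floordiv (r - l) 2) 0 ≠ PySem.List.pyGetD P i 0 then
              min ai (r - l)
            else ai) ai) (N + 1)
      = (PySem.List.pyRange 0 (i + 1) 1).foldl (fun b l =>
        (PySem.List.pyRange (i + 1) (N + 1) 1).foldl (fun b r =>
          if PySem.Int.mod (r - l) 2 = 0 then b
          else
            if PySem.Int.floordiv (r - l) 2 + 1 ≤
                PySem.List.pyGetD ((PySem.List.slice P none (some N)).foldl
                  (fun a v => a ++ [PySem.List.pyGetD a (-1) 0 + if v < PySem.List.pyGetD P i 0 then 1 else 0]) [0]) r 0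
                - PySem.List.pyGetD ((PySem.List.slice P none (some N)).foldl
                  (fun a v => a ++ [PySem.List.pyGetD a (-1) 0 + if v < PySem.List.pyGetD P i 0 then 1 else 0]) [0]) l 0
              ∨ PySem.List.pyGetD ((PySem.List.slice P none (some N)).foldl
                  (fun a v => a ++ [PySem.List.pyGetD a (-1) 0 + if v ≤ PySem.List.pyGetD P i 0 then 1 else 0]) [0]) r 0
                - PySem.List.pyGetD ((PySem.List.slice P none (some N)).foldl
                  (fun a v => a ++ [PySem.List.pyGetD a (-1) 0 + if v ≤ PySem.List.pyGetD P i 0 then 1 else 0]) [0]) l 0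
                ≤ PySem.Int.floordiv (r - l) 2 then
              min b (r - l)
            else b) b) (N + 1) := by
    refine PySem.List.foldl_congr_mem _ _ _ _ ?_
    intro acc l hl
    rw [PySem.List.mem_pyRange_one] at hl
    refine PySem.List.foldl_congr_mem _ _ _ _ ?_
    intro b r hr
    rw [PySem.List.mem_pyRange_one] at hr
    by_cases hg : PySem.Int.mod (r - l) 2 = 0
    · simp only [if_pos hg]
    · simp only [if_neg hg]
      exact if_congr (cond_iff P (PySem.List.pyGetD P i 0) l r N hl.1 (by omega) (by omega) hN) rfl rfl
  rw [hfold, ite_not]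

-- ===== VERDICT (by name: the statement is the Claim_ definition above) =====
theorem guchoku_spec : Claim_equal_guchoku := by
  intro N P _hdom hpre
  unfold Spec_guchoku guchoku guchoku_alt
  rw [PySem.List.foldl_append_singleton_eq_map, List.nil_append]
  refine List.map_congr_left ?_
  intro i hi
  rw [PySem.List.mem_pyRange_one] at hi
  exact body_eq N P i hpre hi.1 hi.2
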